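-- pv_equiv track=rewrite | github.com/KChen-lab/Monopogen | src/utils.py | Count_Start_and_End
-- ===== SOURCE A (Python) =====
-- def Count_Start_and_End(s):
--     end_counts = s.count('$')
--     ns = s.replace('$', '')
--     start_counts = 0
--     i = 0
--     fs = ''
--     while (i < len(ns)):
--         if ns[i] == '^':
--             i += 2
--             start_counts += 1
--         else:
--             fs = fs + ns[i]
--             i += 1
--     return (start_counts, end_counts, fs)
-- ===== SOURCE B (Python) =====
-- def Count_Start_and_End(s):
--     # One-pass automaton with a skip flag (instead of count+replace preprocessing
--     # and an index loop with i += 2 jumps); output built via list + join.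
--     start_counts = 0
--     end_counts = 0
--     skip = False
--     kept = []
--     for c in s:
--         if c == '$':
--             end_counts += 1
--         elif skip:
--             skip = False
--         elif c == '^':
--             start_counts += 1
--             skip = True
--         else:
--             kept.append(c)
--     return (start_counts, end_counts, ''.join(kept))
-- ===== Notes on version B (the rewrite author's own statement) =====
-- stated objective: faster
-- what changed: Replaces A's three passes (count the end markers, strip them with replace, then an index while-loop that jumps i+=2 past caret pairs and grows the result by repeated string concatenation) with a single left-to-right pass: a two-state automaton with a skip flag that counts end markers inline and collects kept characters in a list joined once.
import Mathlib
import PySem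

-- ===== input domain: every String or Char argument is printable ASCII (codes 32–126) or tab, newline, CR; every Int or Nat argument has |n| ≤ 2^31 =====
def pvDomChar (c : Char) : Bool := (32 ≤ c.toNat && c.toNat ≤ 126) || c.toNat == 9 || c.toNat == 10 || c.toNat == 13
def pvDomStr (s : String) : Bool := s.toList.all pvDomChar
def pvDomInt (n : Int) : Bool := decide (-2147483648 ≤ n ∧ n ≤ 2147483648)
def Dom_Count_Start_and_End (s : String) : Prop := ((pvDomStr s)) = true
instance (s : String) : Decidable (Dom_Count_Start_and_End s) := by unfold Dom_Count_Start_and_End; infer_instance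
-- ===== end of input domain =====

-- B replaces A's count/replace preprocessing plus index loop with i += 2 jumps by a
-- single pass with a skip flag (objective: faster; A concatenates fs = fs + c, B joins once).

-- ===== PORT A =====
-- A's while loop over ns with index i: ported as structural recursion on the character
-- list of ns (ns[i] == '^' → i += 2 is dropping one extra character; fs = fs + ns[i]
-- is appending one character, modelled on List Char, String.ofList at the end).
def Count_Start_and_End_loopA : List Char → Int → List Char → Int × List Char
  | [], sc, fs => (sc, fs)
  | c :: rest, sc, fs =>
      if c = '^' then Count_Start_and_End_loopA rest.tail (sc + 1) fs
      else Count_Start_and_End_loopA rest sc (fs ++ [c])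
  termination_by l _ _ => l.length
  decreasing_by
  all_goals simp [List.length_tail]

def Count_Start_and_End (s : String) : Int × Int × String :=
  let end_counts : Int := (PySem.Str.count s "$" : Int)
  let ns : String := PySem.Str.replace s "$" ""
  let r := Count_Start_and_End_loopA ns.toList 0 []
  (r.1, end_counts, String.ofList r.2)

-- ===== PORT B =====
-- B's single pass with a skip flag: state (start_counts, end_counts, skip, kept).
def Count_Start_and_End_step (q : Int × Int × Bool × List Char) (c : Char) :
    Int × Int × Bool × List Char :=
  let (st, en, sk, kept) := q
  if c = '$' then (st, en + 1, sk, kept)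
  else if sk then (st, en, false, kept)
  else if c = '^' then (st + 1, en, true, kept)
  else (st, en, sk, kept ++ [c])

def Count_Start_and_End_alt (s : String) : Int × Int × String :=
  let r := s.toList.foldl Count_Start_and_End_step (0, 0, false, [])
  (r.1, r.2.1, String.ofList r.2.2.2)

-- ===== PRECONDITION & SPEC =====
def Spec_Count_Start_and_End (s : String) (out : Int × Int × String) : Prop := out = Count_Start_and_End_alt s
instance (s : String) (out : Int × Int × String) : Decidable (Spec_Count_Start_and_End s out) := by unfold Spec_Count_Start_and_End; infer_instance

-- ===== CLAIM (what is proved, stated in full; the proofs are below) =====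
def Claim_equal_Count_Start_and_End : Prop := ∀ (s : String), Dom_Count_Start_and_End s → Spec_Count_Start_and_End s (Count_Start_and_End s)

-- ===== LEMMAS AND PROOFS =====

-- count.go with the single-character pattern "$" counts occurrences of '$'.
lemma pv_count_go (l : List Char) : ∀ (fuel : Nat) (acc : Nat), l.length ≤ fuel →
    PySem.Chars.count.go ['$'] fuel l acc = acc + l.count '$' := by
  induction l with
  | nil => intro fuel acc h; cases fuel <;> simp [PySem.Chars.count.go]
  | cons c t ih =>
    intro fuel acc h
    cases fuel with
    | zero => simp at h
    | succ n =>
      by_cases hc : c = '$'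
      · subst hc
        rw [show PySem.Chars.count.go ['$'] (n + 1) ('$' :: t) acc
              = PySem.Chars.count.go ['$'] n t (acc + 1) from by
            simp [PySem.Chars.count.go, List.isPrefixOf]]
        rw [ih n (acc + 1) (by simpa using h)]
        simp
        omega
      · rw [show PySem.Chars.count.go ['$'] (n + 1) (c :: t) acc
              = PySem.Chars.count.go ['$'] n t acc from by
            simp [PySem.Chars.count.go, List.isPrefixOf,
                  beq_eq_false_iff_ne.mpr (Ne.symm hc)]]
        rw [ih n acc (by simpa using h)]
        simp [hc]

-- replace.go with pattern "$" and empty replacement filters '$' out.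
lemma pv_replace_go (l : List Char) : ∀ (fuel : Nat) (acc : List Char), l.length ≤ fuel →
    PySem.Chars.replace.go ['$'] [] fuel l acc
      = acc.reverse ++ l.filter (fun c => decide (c ≠ '$')) := by
  induction l with
  | nil => intro fuel acc h; cases fuel <;> simp [PySem.Chars.replace.go]
  | cons c t ih =>
    intro fuel acc h
    cases fuel with
    | zero => simp at h
    | succ n =>
      by_cases hc : c = '$'
      · subst hc
        rw [show PySem.Chars.replace.go ['$'] [] (n + 1) ('$' :: t) acc
              = PySem.Chars.replace.go ['$'] [] n t acc from by
            simp [PySem.Chars.replace.go, List.isPrefixOf]]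
        rw [ih n acc (by simpa using h)]
        simp
      · rw [show PySem.Chars.replace.go ['$'] [] (n + 1) (c :: t) acc
              = PySem.Chars.replace.go ['$'] [] n t (c :: acc) from by
            simp [PySem.Chars.replace.go, List.isPrefixOf,
                  beq_eq_false_iff_ne.mpr (Ne.symm hc)]]
        rw [ih n (c :: acc) (by simpa using h)]
        simp [hc]

lemma pv_loopA_nil (sc : Int) (fs : List Char) :
    Count_Start_and_End_loopA [] sc fs = (sc, fs) := by
  rw [Count_Start_and_End_loopA]

lemma pv_loopA_caret (rest : List Char) (sc : Int) (fs : List Char) :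
    Count_Start_and_End_loopA ('^' :: rest) sc fs
      = Count_Start_and_End_loopA rest.tail (sc + 1) fs := by
  rw [Count_Start_and_End_loopA]; simp

lemma pv_loopA_other (c : Char) (h : c ≠ '^') (rest : List Char) (sc : Int) (fs : List Char) :
    Count_Start_and_End_loopA (c :: rest) sc fs
      = Count_Start_and_End_loopA rest sc (fs ++ [c]) := by
  rw [Count_Start_and_End_loopA]; simp [h]

-- The central invariant: B's fold from a skip=false (resp. skip=true) state computes
-- A's loop on the '$'-filtered remainder (resp. its tail), plus the '$' count.
lemma pv_main (l : List Char) : ∀ (st en : Int) (kept : List Char),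
    (let r := l.foldl Count_Start_and_End_step (st, en, false, kept)
     (r.1, r.2.1, r.2.2.2) =
       ((Count_Start_and_End_loopA (l.filter (fun c => decide (c ≠ '$'))) st kept).1,
        en + (l.count '$' : Int),
        (Count_Start_and_End_loopA (l.filter (fun c => decide (c ≠ '$'))) st kept).2)) ∧
    (let r := l.foldl Count_Start_and_End_step (st, en, true, kept)
     (r.1, r.2.1, r.2.2.2) =
       ((Count_Start_and_End_loopA (l.filter (fun c => decide (c ≠ '$'))).tail st kept).1,
        en + (l.count '$' : Int),
        (Count_Start_and_End_loopA (l.filter (fun c => decide (c ≠ '$'))).tail st kept).2)) := by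
  induction l with
  | nil => intro st en kept; simp [pv_loopA_nil]
  | cons c t ih =>
    intro st en kept
    by_cases hc : c = '$'
    · subst hc
      have hstepF : Count_Start_and_End_step (st, en, false, kept) '$' = (st, en + 1, false, kept) := by
        simp [Count_Start_and_End_step]
      have hstepT : Count_Start_and_End_step (st, en, true, kept) '$' = (st, en + 1, true, kept) := by
        simp [Count_Start_and_End_step]
      constructor
      · simp only [List.foldl_cons, hstepF, List.filter_cons, List.count_cons]
        have := (ih st (en + 1) kept).1
        simp only at this
        simpa [add_assoc, add_comm, add_left_comm] using this
      · simp only [List.foldl_cons, hstepT, List.filter_cons, List.count_cons]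
        have := (ih st (en + 1) kept).2
        simp only at this
        simpa [add_assoc, add_comm, add_left_comm] using this
    · have hfil : (c :: t).filter (fun c => decide (c ≠ '$'))
          = c :: t.filter (fun c => decide (c ≠ '$')) := by simp [hc]
      have hcnt : ((c :: t).count '$' : Int) = (t.count '$' : Int) := by
        simp [hc]
      constructor
      · by_cases hh : c = '^'
        · subst hh
          have hstep : Count_Start_and_End_step (st, en, false, kept) '^' = (st + 1, en, true, kept) := by
            simp [Count_Start_and_End_step]
          simp only [List.foldl_cons, hstep, hfil, hcnt, pv_loopA_caret]
          exact (ih (st + 1) en kept).2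
        · have hstep : Count_Start_and_End_step (st, en, false, kept) c = (st, en, false, kept ++ [c]) := by
            simp [Count_Start_and_End_step, hc, hh]
          simp only [List.foldl_cons, hstep, hfil, hcnt, pv_loopA_other c hh]
          exact (ih st en (kept ++ [c])).1
      · have hstep : Count_Start_and_End_step (st, en, true, kept) c = (st, en, false, kept) := by
          simp [Count_Start_and_End_step, hc]
        simp only [List.foldl_cons, hstep, hfil, hcnt, List.tail_cons]
        exact (ih st en kept).1

-- ===== VERDICT (by name: the statement is the Claim_ definition above) =====
theorem Count_Start_and_End_spec : Claim_equal_Count_Start_and_End := by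
  intro s _
  unfold Spec_Count_Start_and_End
  have hcnt : (PySem.Str.count s "$" : Int) = (s.toList.count '$' : Int) := by
    have := pv_count_go s.toList s.length 0 (le_of_eq String.length_toList)
    simp [PySem.Str.count, PySem.Chars.count]
    omega
  have hrep : (PySem.Str.replace s "$" "").toList
      = s.toList.filter (fun c => decide (c ≠ '$')) := by
    have := pv_replace_go s.toList s.length [] (le_of_eq String.length_toList)
    simp [PySem.Str.replace, PySem.Chars.replace]
    simpa using this
  have h := (pv_main s.toList 0 0 []).1
  simp only [Prod.mk.injEq] at h
  simp only [Count_Start_and_End, Count_Start_and_End_alt, hcnt, hrep, Prod.mk.injEq]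
  exact ⟨h.1.symm, by rw [h.2.1]; simp, congrArg String.ofList h.2.2.symm⟩
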